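-- pv_equiv track=rewrite | github.com/Jason003/interview | Doordash/Count All Valid Pickup and Delivery Options.py | generateValidOrders
-- ===== SOURCE A (Python) =====
-- def generateValidOrders(n):
--     res = []
--     def dfs(picks, deliveries, curr):
--         if len(picks) == len(deliveries) == n:
--             res.append(curr)
--         for i in range(1, n + 1):
--             if i not in picks:
--                 dfs(picks | {i}, deliveries, curr + ['P' + str(i)])
--             if i in picks and i not in deliveries:
--                 dfs(picks, deliveries | {i}, curr + ['D' + str(i)])
--     dfs(set(), set(), [])
--     return res
-- ===== SOURCE B (Python) =====
-- def generateValidOrders(n):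
--     # Iterative level-by-level (BFS) expansion: each round extends every partial
--     # sequence by one valid move (for i = 1..n: pick i if unpicked, else deliver
--     # i if undelivered), so after 2n rounds the states are exactly the complete
--     # valid sequences, in the same left-to-right order as a preorder DFS.
--     states = [([], set(), set())]
--     for _ in range(2 * n):
--         nxt = []
--         for curr, picks, delivs in states:
--             for i in range(1, n + 1):
--                 if i not in picks:
--                     nxt.append((curr + ['P' + str(i)], picks | {i}, delivs))
--                 elif i not in delivs:
--                     nxt.append((curr + ['D' + str(i)], picks, delivs | {i}))
--         states = nxt
--     return [curr for curr, _, _ in states if len(curr) == 2 * n]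
-- ===== Notes on version B (the rewrite author's own statement) =====
-- stated objective: alternative
-- what changed: Replaces A's recursive DFS with shared mutable res and a prefix threaded down by an iterative breadth-first expansion: a list of (sequence, picks, deliveries) states is extended move-by-move for 2n rounds, and per-level left-to-right extension in the same move order reproduces A's preorder output exactly.
import Mathlib
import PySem

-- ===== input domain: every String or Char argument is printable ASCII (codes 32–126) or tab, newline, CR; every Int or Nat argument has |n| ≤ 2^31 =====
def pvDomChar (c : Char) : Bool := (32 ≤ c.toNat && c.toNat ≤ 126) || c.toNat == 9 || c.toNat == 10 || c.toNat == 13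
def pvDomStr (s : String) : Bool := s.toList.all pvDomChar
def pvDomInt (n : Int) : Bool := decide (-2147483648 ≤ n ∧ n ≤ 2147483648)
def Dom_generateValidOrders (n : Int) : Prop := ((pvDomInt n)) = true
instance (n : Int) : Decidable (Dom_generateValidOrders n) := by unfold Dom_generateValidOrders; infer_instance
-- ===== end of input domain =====

-- B replaces A's recursive DFS (mutable res, prefix threaded down) by an iterative
-- breadth-first level expansion of partial states; objective: alternative, same output.

-- ===== PORT A =====
-- A's dfs, fuel-guarded (the recursion is at most 2n+1 frames deep, so the fuel given
-- below never runs out); `res` is the list A appends to, `curr` the prefix threaded down.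
def pvDfsA (n : Int) : Nat → PySem.Set Int → PySem.Set Int → List String → List (List String) → List (List String)
  | 0, _, _, _, res => res
  | f+1, picks, dels, curr, res =>
    (PySem.List.pyRange 1 (n+1) 1).foldl
      (fun r i =>
        let r1 := if i ∉ picks then pvDfsA n f (PySem.Set.add picks i) dels (curr ++ ["P" ++ PySem.Int.toStr i]) r else r
        if i ∈ picks ∧ i ∉ dels then pvDfsA n f picks (PySem.Set.add dels i) (curr ++ ["D" ++ PySem.Int.toStr i]) r1 else r1)
      (if (picks.length : Int) = dels.length ∧ (dels.length : Int) = n then res ++ [curr] else res)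

def generateValidOrders (n : Int) : List (List String) :=
  pvDfsA n ((2 * n).toNat + 1) PySem.Set.empty PySem.Set.empty [] []

-- ===== PORT B =====
-- one round of B's loop body: extend every state by every valid single move
def pvStepB (n : Int) (states : List (List String × PySem.Set Int × PySem.Set Int)) :
    List (List String × PySem.Set Int × PySem.Set Int) :=
  states.foldl
    (fun nxt s =>
      (PySem.List.pyRange 1 (n+1) 1).foldl
        (fun nxt i =>
          if i ∉ s.2.1 then nxt ++ [(s.1 ++ ["P" ++ PySem.Int.toStr i], PySem.Set.add s.2.1 i, s.2.2)]
          else if i ∉ s.2.2 then nxt ++ [(s.1 ++ ["D" ++ PySem.Int.toStr i], s.2.1, PySem.Set.add s.2.2 i)]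
          else nxt)
        nxt)
    []

def generateValidOrders_alt (n : Int) : List (List String) :=
  let states := (PySem.List.pyRange 0 (2*n) 1).foldl (fun st _ => pvStepB n st)
    [(([] : List String), PySem.Set.empty, PySem.Set.empty)]
  (states.filter (fun s => decide ((s.1.length : Int) = 2*n))).map (fun s => s.1)

-- ===== PRECONDITION & SPEC =====
def Spec_generateValidOrders (n : Int) (out : List (List String)) : Prop := out = generateValidOrders_alt n
instance (n : Int) (out : List (List String)) : Decidable (Spec_generateValidOrders n out) := by unfold Spec_generateValidOrders; infer_instance

-- ===== CLAIM (what is proved, stated in full; the proofs are below) =====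
def Claim_equal_generateValidOrders : Prop := ∀ (n : Int), Dom_generateValidOrders n → Spec_generateValidOrders n (generateValidOrders n)

-- ===== LEMMAS AND PROOFS =====

-- proof-only middle man: the pure recursion returning the valid completions (suffixes) of a state
def pvSolve (n : Int) : Nat → PySem.Set Int → PySem.Set Int → List (List String)
  | 0, _, _ => []
  | f+1, picks, dels =>
    (PySem.List.pyRange 1 (n+1) 1).foldl
      (fun out i =>
        let o1 := if i ∉ picks then out ++ (pvSolve n f (PySem.Set.add picks i) dels).map (fun t => ("P" ++ PySem.Int.toStr i) :: t) else out
        if i ∈ picks ∧ i ∉ dels then o1 ++ (pvSolve n f picks (PySem.Set.add dels i)).map (fun t => ("D" ++ PySem.Int.toStr i) :: t) else o1)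
      (if (picks.length : Int) = dels.length ∧ (dels.length : Int) = n then [[]] else [])

lemma pv_map_prepend (curr : List String) (m : String) (L : List (List String)) :
    (L.map (fun t => m :: t)).map (fun t => curr ++ t) = L.map (fun t => (curr ++ [m]) ++ t) := by
  simp [List.map_map, Function.comp_def]

-- A-side invariant: A's accumulator run equals res ++ the suffixes with the prefix attached
lemma pv_dfsA_eq (n : Int) : ∀ (f : Nat) (picks dels : PySem.Set Int) (curr : List String)
    (res : List (List String)),
    pvDfsA n f picks dels curr res = res ++ (pvSolve n f picks dels).map (fun t => curr ++ t) := by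
  intro f
  induction f with
  | zero => intro picks dels curr res; simp [pvDfsA, pvSolve]
  | succ f ih =>
    intro picks dels curr res
    have loop : ∀ (l : List Int) (out res : List (List String)),
        l.foldl
          (fun r i =>
            let r1 := if i ∉ picks then pvDfsA n f (PySem.Set.add picks i) dels (curr ++ ["P" ++ PySem.Int.toStr i]) r else r
            if i ∈ picks ∧ i ∉ dels then pvDfsA n f picks (PySem.Set.add dels i) (curr ++ ["D" ++ PySem.Int.toStr i]) r1 else r1)
          (res ++ out.map (fun t => curr ++ t))
      = res ++ (l.foldl
          (fun o i =>
            let o1 := if i ∉ picks then o ++ (pvSolve n f (PySem.Set.add picks i) dels).map (fun t => ("P" ++ PySem.Int.toStr i) :: t) else o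
            if i ∈ picks ∧ i ∉ dels then o1 ++ (pvSolve n f picks (PySem.Set.add dels i)).map (fun t => ("D" ++ PySem.Int.toStr i) :: t) else o1)
          out).map (fun t => curr ++ t) := by
      intro l
      induction l with
      | nil => intro out res; simp
      | cons i l ihl =>
        intro out res
        simp only [List.foldl_cons]
        by_cases hp : i ∈ picks <;> by_cases hd : i ∈ dels <;>
          simp only [hp, hd, not_true_eq_false, not_false_eq_true, if_true, and_true, and_false,
            if_neg (fun h : False => h)] <;>
          first
          | exact ihl out res
          | (rw [ih, ← pv_map_prepend, List.append_assoc, ← List.map_append]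
             exact ihl _ res)
    have hinit : (if (picks.length : Int) = dels.length ∧ (dels.length : Int) = n then res ++ [curr] else res)
        = res ++ (if (picks.length : Int) = dels.length ∧ (dels.length : Int) = n then [[]] else ([] : List (List String))).map (fun t => curr ++ t) := by
      split_ifs <;> simp
    simp only [pvDfsA, pvSolve]
    rw [hinit]
    exact loop _ _ _

-- B-side machinery: the children of one state, as a flatMap
def pvKids (n : Int) (s : List String × PySem.Set Int × PySem.Set Int) :
    List (List String × PySem.Set Int × PySem.Set Int) :=
  (PySem.List.pyRange 1 (n+1) 1).flatMap (fun i =>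
    if i ∉ s.2.1 then [(s.1 ++ ["P" ++ PySem.Int.toStr i], PySem.Set.add s.2.1 i, s.2.2)]
    else if i ∉ s.2.2 then [(s.1 ++ ["D" ++ PySem.Int.toStr i], s.2.1, PySem.Set.add s.2.2 i)]
    else [])

-- one state's inner loop, as accumulator ++ children
lemma pv_inner_eq_kids (s : List String × PySem.Set Int × PySem.Set Int) :
    ∀ (l : List Int) (nxt : List (List String × PySem.Set Int × PySem.Set Int)),
    l.foldl
      (fun nxt i =>
        if i ∉ s.2.1 then nxt ++ [(s.1 ++ ["P" ++ PySem.Int.toStr i], PySem.Set.add s.2.1 i, s.2.2)]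
        else if i ∉ s.2.2 then nxt ++ [(s.1 ++ ["D" ++ PySem.Int.toStr i], s.2.1, PySem.Set.add s.2.2 i)]
        else nxt)
      nxt
    = nxt ++ l.flatMap (fun i =>
        if i ∉ s.2.1 then [(s.1 ++ ["P" ++ PySem.Int.toStr i], PySem.Set.add s.2.1 i, s.2.2)]
        else if i ∉ s.2.2 then [(s.1 ++ ["D" ++ PySem.Int.toStr i], s.2.1, PySem.Set.add s.2.2 i)]
        else []) := by
  intro l
  induction l with
  | nil => intro nxt; simp
  | cons i l ih =>
    intro nxt
    simp only [List.foldl_cons, List.flatMap_cons]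
    rw [ih]
    split_ifs <;> simp

lemma pv_step_eq_flatMap (n : Int) (S : List (List String × PySem.Set Int × PySem.Set Int)) :
    pvStepB n S = S.flatMap (pvKids n) := by
  suffices h : ∀ (acc : List (List String × PySem.Set Int × PySem.Set Int)),
      S.foldl
        (fun nxt s =>
          (PySem.List.pyRange 1 (n+1) 1).foldl
            (fun nxt i =>
              if i ∉ s.2.1 then nxt ++ [(s.1 ++ ["P" ++ PySem.Int.toStr i], PySem.Set.add s.2.1 i, s.2.2)]
              else if i ∉ s.2.2 then nxt ++ [(s.1 ++ ["D" ++ PySem.Int.toStr i], s.2.1, PySem.Set.add s.2.2 i)]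
              else nxt)
            nxt)
        acc = acc ++ S.flatMap (pvKids n) by
    unfold pvStepB
    exact (h []).trans (List.nil_append _)
  induction S with
  | nil => intro acc; simp
  | cons s S ih =>
    intro acc
    simp only [List.foldl_cons, List.flatMap_cons]
    rw [pv_inner_eq_kids, ih]
    simp [pvKids]

def pvIter (n : Int) : Nat → List (List String × PySem.Set Int × PySem.Set Int) →
    List (List String × PySem.Set Int × PySem.Set Int)
  | 0, S => S
  | k+1, S => pvIter n k (pvStepB n S)

lemma pv_iter_append (n : Int) (k : Nat) : ∀ (S T : List (List String × PySem.Set Int × PySem.Set Int)),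
    pvIter n k (S ++ T) = pvIter n k S ++ pvIter n k T := by
  induction k with
  | zero => intro S T; rfl
  | succ k ih =>
    intro S T
    simp only [pvIter]
    rw [pv_step_eq_flatMap, List.flatMap_append, ih, ← pv_step_eq_flatMap, ← pv_step_eq_flatMap]

lemma pv_foldl_step (n : Int) (l : List Int) :
    ∀ S, l.foldl (fun st _ => pvStepB n st) S = pvIter n l.length S := by
  induction l with
  | nil => intro S; rfl
  | cons x l ih =>
    intro S
    simp only [List.foldl_cons, List.length_cons]
    rw [ih]
    rfl

lemma pv_iter_nil (n : Int) (k : Nat) : pvIter n k [] = [] := by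
  induction k with
  | zero => rfl
  | succ k ih => show pvIter n k (pvStepB n []) = []; rw [show pvStepB n [] = [] from rfl]; exact ih

lemma pv_iter_flatMap (n : Int) (k : Nat) (g : Int → List (List String × PySem.Set Int × PySem.Set Int)) :
    ∀ (l : List Int), pvIter n k (l.flatMap g) = l.flatMap (fun i => pvIter n k (g i)) := by
  intro l
  induction l with
  | nil => simp [pv_iter_nil]
  | cons i l ih => simp only [List.flatMap_cons]; rw [pv_iter_append, ih]

-- every state k levels down carries k more moves than its ancestor
lemma pv_iter_len (n : Int) : ∀ (k : Nat)
    (S : List (List String × PySem.Set Int × PySem.Set Int)) (L : Nat),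
    (∀ s ∈ S, s.1.length = L) → ∀ s' ∈ pvIter n k S, s'.1.length = L + k := by
  intro k
  induction k with
  | zero => intro S L hS s' hs'; simpa using hS s' hs'
  | succ k ih =>
    intro S L hS s' hs'
    have hstep : ∀ s'' ∈ pvStepB n S, s''.1.length = L + 1 := by
      intro s'' hm
      rw [pv_step_eq_flatMap] at hm
      rcases List.mem_flatMap.mp hm with ⟨s, hs, hk⟩
      simp only [pvKids] at hk
      rcases List.mem_flatMap.mp hk with ⟨i, _, hif⟩
      split_ifs at hif <;>
        first
        | (simp only [List.mem_singleton] at hif; subst hif; simp [hS s hs])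
        | simp at hif
    have h := ih (pvStepB n S) (L+1) hstep s' hs'
    omega

-- the remaining-move count of a state
def pvRem (n : Int) (p d : List Int) : Nat :=
  2 * ((PySem.List.pyRange 1 (n+1) 1).filter (fun i => decide (i ∉ p))).length
    + (p.filter (fun i => decide (i ∉ d))).length

lemma pv_filter_ne_length {A : List Int} (hA : A.Nodup) {i : Int} (hi : i ∈ A) :
    (A.filter (fun x => decide (x ≠ i))).length + 1 = A.length := by
  have he : A.filter (fun x => decide (x ≠ i)) = A.erase i := by
    rw [List.Nodup.erase_eq_filter hA i]
    apply List.filter_congr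
    intro x _
    by_cases h : x = i <;> simp [h]
  rw [he, List.length_erase_of_mem hi]
  have := List.length_pos_of_mem hi
  omega

-- picking i consumes one pick-availability and creates one delivery-availability
lemma pv_rem_pick (n : Int) (p d : List Int) (i : Int)
    (hiR : i ∈ PySem.List.pyRange 1 (n+1) 1) (hip : i ∉ p) (hid : i ∉ d) :
    pvRem n (p ++ [i]) d + 1 = pvRem n p d := by
  unfold pvRem
  have h1 : (PySem.List.pyRange 1 (n+1) 1).filter (fun x => decide (x ∉ p ++ [i]))
      = ((PySem.List.pyRange 1 (n+1) 1).filter (fun x => decide (x ∉ p))).filter (fun x => decide (x ≠ i)) := by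
    rw [List.filter_filter]
    apply List.filter_congr
    intro x _
    by_cases hxp : x ∈ p <;> by_cases hxi : x = i <;> simp [hxp, hxi]
  have hA : (((PySem.List.pyRange 1 (n+1) 1).filter (fun x => decide (x ∉ p)))).Nodup :=
    (PySem.List.nodup_pyRange_one 1 (n+1)).filter _
  have hiA : i ∈ (PySem.List.pyRange 1 (n+1) 1).filter (fun x => decide (x ∉ p)) :=
    List.mem_filter.mpr ⟨hiR, by simp [hip]⟩
  have h2 := pv_filter_ne_length hA hiA
  have h3 : (p ++ [i]).filter (fun x => decide (x ∉ d)) = p.filter (fun x => decide (x ∉ d)) ++ [i] := by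
    simp [List.filter_append, hid]
  rw [h1, h3]
  simp only [List.length_append, List.length_cons, List.length_nil]
  omega

-- delivering i consumes one delivery-availability
lemma pv_rem_deliver (n : Int) (p d : List Int) (i : Int)
    (hp : p.Nodup) (hip : i ∈ p) (hid : i ∉ d) :
    pvRem n p (d ++ [i]) + 1 = pvRem n p d := by
  unfold pvRem
  have h1 : p.filter (fun x => decide (x ∉ d ++ [i]))
      = (p.filter (fun x => decide (x ∉ d))).filter (fun x => decide (x ≠ i)) := by
    rw [List.filter_filter]
    apply List.filter_congr
    intro x _
    by_cases hxd : x ∈ d <;> by_cases hxi : x = i <;> simp [hxd, hxi]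
  have hA : (p.filter (fun x => decide (x ∉ d))).Nodup := hp.filter _
  have hiA : i ∈ p.filter (fun x => decide (x ∉ d)) := List.mem_filter.mpr ⟨hip, by simp [hid]⟩
  have h2 := pv_filter_ne_length hA hiA
  rw [h1]
  omega

-- a state with no remaining moves is complete (and vice versa)
lemma pv_complete_of_rem_zero (n : Int) (hn : 0 ≤ n) (p d : List Int)
    (hp : p.Nodup) (hd : d.Nodup) (hdp : ∀ x ∈ d, x ∈ p)
    (hpR : ∀ x ∈ p, x ∈ PySem.List.pyRange 1 (n+1) 1) (h0 : pvRem n p d = 0) :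
    ((p.length : Int) = d.length ∧ (d.length : Int) = n)
      ∧ (∀ i ∈ PySem.List.pyRange 1 (n+1) 1, i ∈ p) ∧ (∀ x ∈ p, x ∈ d) := by
  unfold pvRem at h0
  have ha : (PySem.List.pyRange 1 (n+1) 1).filter (fun x => decide (x ∉ p)) = [] :=
    List.length_eq_zero_iff.mp (by omega)
  have hb : p.filter (fun x => decide (x ∉ d)) = [] := List.length_eq_zero_iff.mp (by omega)
  have hRp : ∀ i ∈ PySem.List.pyRange 1 (n+1) 1, i ∈ p := by
    intro i hi
    by_contra hcon
    have := List.filter_eq_nil_iff.mp ha i hi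
    simp [hcon] at this
  have hpd : ∀ x ∈ p, x ∈ d := by
    intro x hx
    by_contra hcon
    have := List.filter_eq_nil_iff.mp hb x hx
    simp [hcon] at this
  have hperm1 : List.Perm p (PySem.List.pyRange 1 (n+1) 1) :=
    (List.perm_ext_iff_of_nodup hp (PySem.List.nodup_pyRange_one 1 (n+1))).mpr
      (fun a => ⟨fun h => hpR a h, fun h => hRp a h⟩)
  have hperm2 : List.Perm d p :=
    (List.perm_ext_iff_of_nodup hd hp).mpr (fun a => ⟨fun h => hdp a h, fun h => hpd a h⟩)
  have hlen1 : p.length = ((n+1) - 1).toNat := by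
    rw [hperm1.length_eq, PySem.List.length_pyRange_one]
  have hlen2 : d.length = p.length := hperm2.length_eq
  refine ⟨⟨by omega, by omega⟩, hRp, hpd⟩

lemma pv_rem_zero_of_complete (n : Int) (p d : List Int)
    (hp : p.Nodup) (hd : d.Nodup) (hdp : ∀ x ∈ d, x ∈ p)
    (hpR : ∀ x ∈ p, x ∈ PySem.List.pyRange 1 (n+1) 1)
    (hc : (p.length : Int) = d.length ∧ (d.length : Int) = n) : pvRem n p d = 0 := by
  have hRlen : (PySem.List.pyRange 1 (n+1) 1).length = ((n+1) - 1).toNat :=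
    PySem.List.length_pyRange_one 1 (n+1)
  have hsub1 : p.Subperm (PySem.List.pyRange 1 (n+1) 1) := List.subperm_of_subset hp hpR
  have hperm1 : List.Perm p (PySem.List.pyRange 1 (n+1) 1) :=
    List.Subperm.perm_of_length_le hsub1 (by omega)
  have hsub2 : d.Subperm p := List.subperm_of_subset hd hdp
  have hperm2 : List.Perm d p := List.Subperm.perm_of_length_le hsub2 (by omega)
  have ha : (PySem.List.pyRange 1 (n+1) 1).filter (fun x => decide (x ∉ p)) = [] := by
    rw [List.filter_eq_nil_iff]
    intro x hx
    simp [hperm1.mem_iff.mpr hx]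
  have hb : p.filter (fun x => decide (x ∉ d)) = [] := by
    rw [List.filter_eq_nil_iff]
    intro x hx
    simp [hperm2.mem_iff.mpr hx]
  unfold pvRem
  rw [ha, hb]
  simp

-- pvSolve's loop as accumulator ++ flatMap
lemma pv_solve_fold (n : Int) (f : Nat) (p d : PySem.Set Int) :
    ∀ (l : List Int) (out : List (List String)),
    l.foldl
      (fun out i =>
        let o1 := if i ∉ p then out ++ (pvSolve n f (PySem.Set.add p i) d).map (fun t => ("P" ++ PySem.Int.toStr i) :: t) else out
        if i ∈ p ∧ i ∉ d then o1 ++ (pvSolve n f p (PySem.Set.add d i)).map (fun t => ("D" ++ PySem.Int.toStr i) :: t) else o1)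
      out
    = out ++ l.flatMap (fun i =>
        (if i ∉ p then (pvSolve n f (PySem.Set.add p i) d).map (fun t => ("P" ++ PySem.Int.toStr i) :: t) else [])
        ++ (if i ∈ p ∧ i ∉ d then (pvSolve n f p (PySem.Set.add d i)).map (fun t => ("D" ++ PySem.Int.toStr i) :: t) else [])) := by
  intro l
  induction l with
  | nil => intro out; simp
  | cons i l ih =>
    intro out
    simp only [List.foldl_cons, List.flatMap_cons]
    rw [ih]
    split_ifs <;> simp

-- core: iterating B's step exactly pvRem-many times from one state yields pvSolve's suffixes
lemma pv_iter_eq_solve (n : Int) (hn : 0 ≤ n) : ∀ (r f : Nat) (p d : PySem.Set Int) (curr : List String),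
    r < f → p.Nodup → d.Nodup → (∀ x ∈ d, x ∈ p) → (∀ x ∈ p, x ∈ PySem.List.pyRange 1 (n+1) 1) →
    r = pvRem n p d →
    (pvIter n r [(curr, p, d)]).map (fun s => s.1) = (pvSolve n f p d).map (fun t => curr ++ t) := by
  intro r
  induction r with
  | zero =>
    intro f p d curr hf hp hd hdp hpR hrem
    obtain ⟨hcomp, hRp, hpd⟩ := pv_complete_of_rem_zero n hn p d hp hd hdp hpR hrem.symm
    cases f with
    | zero => omega
    | succ f' =>
      have hloop : ∀ (l : List Int), (∀ i ∈ l, i ∈ p ∧ i ∈ d) → ∀ (out : List (List String)),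
          l.foldl
            (fun out i =>
              let o1 := if i ∉ p then out ++ (pvSolve n f' (PySem.Set.add p i) d).map (fun t => ("P" ++ PySem.Int.toStr i) :: t) else out
              if i ∈ p ∧ i ∉ d then o1 ++ (pvSolve n f' p (PySem.Set.add d i)).map (fun t => ("D" ++ PySem.Int.toStr i) :: t) else o1)
            out = out := by
        intro l hl
        induction l with
        | nil => intro out; rfl
        | cons i l ihl =>
          intro out
          have hip := (hl i (List.mem_cons_self)).1
          have hid := (hl i (List.mem_cons_self)).2
          simp only [List.foldl_cons, hip, hid, not_true_eq_false, and_false,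
            if_neg (fun h : False => h)]
          exact ihl (fun j hj => hl j (List.mem_cons_of_mem _ hj)) out
      show ([(curr, p, d)].map (fun s => s.1)) = _
      simp only [pvSolve]
      rw [if_pos hcomp, hloop (PySem.List.pyRange 1 (n+1) 1)
        (fun i hi => ⟨hRp i hi, hpd i (hRp i hi)⟩)]
      simp
  | succ k ih =>
    intro f p d curr hf hp hd hdp hpR hrem
    cases f with
    | zero => omega
    | succ f' =>
      have hncomp : ¬((p.length : Int) = d.length ∧ (d.length : Int) = n) := by
        intro hc
        have := pv_rem_zero_of_complete n p d hp hd hdp hpR hc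
        omega
      have hLHS : pvIter n (k+1) [(curr, p, d)] = pvIter n k (pvKids n (curr, p, d)) := by
        show pvIter n k (pvStepB n [(curr, p, d)]) = _
        rw [pv_step_eq_flatMap]
        simp
      rw [hLHS]
      simp only [pvKids]
      rw [pv_iter_flatMap, List.map_flatMap]
      simp only [pvSolve]
      rw [if_neg hncomp, pv_solve_fold, List.nil_append, List.map_flatMap]
      apply List.flatMap_congr
      intro i hi
      by_cases hip : i ∈ p
      · by_cases hid : i ∈ d
        · simp only [hip, hid, not_true_eq_false, and_false,
            if_neg (fun h : False => h)]
          simp [pv_iter_nil]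
        · -- deliver i
          have hadd : PySem.Set.add d i = d ++ [i] := by simp [PySem.Set.add, hid]
          simp only [hip, hid, not_true_eq_false, not_false_eq_true, if_false, if_true,
            and_true]
          rw [hadd]
          have hrec := ih f' p (d ++ [i]) (curr ++ ["D" ++ PySem.Int.toStr i]) (by omega) hp
            (by rw [List.nodup_append]
                exact ⟨hd, List.nodup_singleton i, by intro a ha b hbm; rw [List.mem_singleton] at hbm; subst hbm; exact fun he => hid (he ▸ ha)⟩)
            (by intro x hx; rcases List.mem_append.mp hx with h | h
                · exact hdp x h
                · rw [List.mem_singleton] at h; subst h; exact hip)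
            hpR
            (by have := pv_rem_deliver n p d i hp hip hid; omega)
          rw [hrec, ← pv_map_prepend]
          simp
      · have hid : i ∉ d := fun hx => hip (hdp i hx)
        have hadd : PySem.Set.add p i = p ++ [i] := by simp [PySem.Set.add, hip]
        simp only [hip, hid, not_false_eq_true, if_true, false_and, if_neg (fun h : False => h)]
        rw [hadd]
        have hrec := ih f' (p ++ [i]) d (curr ++ ["P" ++ PySem.Int.toStr i]) (by omega)
          (by rw [List.nodup_append]
              exact ⟨hp, List.nodup_singleton i, by intro a ha b hbm; rw [List.mem_singleton] at hbm; subst hbm; exact fun he => hip (he ▸ ha)⟩)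
          hd
          (by intro x hx; exact List.mem_append.mpr (Or.inl (hdp x hx)))
          (by intro x hx; rcases List.mem_append.mp hx with h | h
              · exact hpR x h
              · rw [List.mem_singleton] at h; subst h; exact hi)
          (by have := pv_rem_pick n p d i hi hip hid; omega)
        rw [hrec, ← pv_map_prepend]
        simp

-- ===== VERDICT (by name: the statement is the Claim_ definition above) =====
theorem generateValidOrders_spec : Claim_equal_generateValidOrders := by
  intro n _
  unfold Spec_generateValidOrders generateValidOrders generateValidOrders_alt
  by_cases hn : 0 ≤ n
  · rw [pv_dfsA_eq, pv_foldl_step]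
    have hlen : (PySem.List.pyRange 0 (2*n) 1).length = (2*n).toNat := by
      rw [PySem.List.length_pyRange_one]; omega
    rw [hlen]
    have hstates := pv_iter_eq_solve n hn ((2*n).toNat) ((2*n).toNat + 1)
      PySem.Set.empty PySem.Set.empty [] (by omega) List.nodup_nil List.nodup_nil
      (by intro x hx; simp at hx) (by intro x hx; simp at hx)
      (by unfold pvRem
          simp [PySem.Set.empty, PySem.List.length_pyRange_one]
          omega)
    have hfilter : (pvIter n ((2*n).toNat) [(([] : List String), PySem.Set.empty, PySem.Set.empty)]).filter
        (fun s => decide ((s.1.length : Int) = 2*n))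
        = pvIter n ((2*n).toNat) [(([] : List String), PySem.Set.empty, PySem.Set.empty)] := by
      apply List.filter_eq_self.mpr
      intro s hs
      have := pv_iter_len n ((2*n).toNat) [(([] : List String), PySem.Set.empty, PySem.Set.empty)] 0
        (by intro s' hs'; simp at hs'; subst hs'; rfl) s hs
      simp only [decide_eq_true_eq]
      omega
    simp only [hfilter, hstates]
    simp
  · have hR : PySem.List.pyRange 1 (n+1) 1 = [] := PySem.List.pyRange_one_eq_nil (by omega)
    have hR2 : PySem.List.pyRange 0 (2*n) 1 = [] := PySem.List.pyRange_one_eq_nil (by omega)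
    simp only [pvDfsA, hR, hR2, List.foldl_nil, List.filter_cons, List.filter_nil,
      PySem.Set.empty, List.length_nil]
    split_ifs <;> simp_all
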